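-- pv_equiv track=rewrite | github.com/itslexiii/Rosalind | PyCharm/Finding a Shared Motif.py | getallcom
-- ===== SOURCE A (Python) =====
-- def getallcom(gfbp, com):
--     comcom = []
--     for i in com:
--         x = 0
--         for j in gfbp:
--             if i in j:
--                 x = x + 1
--             if x == len(gfbp) and i not in comcom:
--                 comcom.append(i)
--     comcom = sorted(comcom, key=len)
--     return comcom
-- ===== SOURCE B (Python) =====
-- def getallcom(gfbp, com):
--     if not gfbp:
--         return []
--     survivors = list(dict.fromkeys(com))
--     for j in gfbp:
--         survivors = [i for i in survivors if i in j]
--     return sorted(survivors, key=len)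
-- ===== Notes on version B (the rewrite author's own statement) =====
-- stated objective: faster
-- what changed: Instead of counting per candidate with a nested loop that re-tests membership in the growing result at every inner step, B deduplicates the candidates once (dict.fromkeys) and shrinks a survivors list with one filtering pass per string, sorting survivors by length at the end.
import Mathlib
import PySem

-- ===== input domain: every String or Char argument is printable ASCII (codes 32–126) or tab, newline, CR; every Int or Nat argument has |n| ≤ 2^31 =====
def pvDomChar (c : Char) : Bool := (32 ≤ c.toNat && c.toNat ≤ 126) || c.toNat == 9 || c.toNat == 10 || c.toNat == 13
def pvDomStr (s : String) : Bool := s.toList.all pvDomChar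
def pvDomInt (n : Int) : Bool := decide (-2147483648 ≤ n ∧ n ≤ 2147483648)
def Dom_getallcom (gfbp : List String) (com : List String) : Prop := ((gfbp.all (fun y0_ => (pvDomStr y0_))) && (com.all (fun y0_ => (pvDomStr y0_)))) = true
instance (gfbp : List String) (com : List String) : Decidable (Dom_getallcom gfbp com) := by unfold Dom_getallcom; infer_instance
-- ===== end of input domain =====

-- B deduplicates the candidates once and shrinks a survivors list per string, instead of A's
-- per-candidate counting loop with membership-based dedup; same return value everywhere.

-- ===== PORT A =====
def getallcom (gfbp : List String) (com : List String) : List String :=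
  let comcom : List String :=
    com.foldl (fun comcom i =>
      (gfbp.foldl (fun (st : Nat × List String) j =>
        let x := if PySem.Str.isIn i j then st.1 + 1 else st.1
        let c := if x = gfbp.length ∧ i ∉ st.2 then st.2 ++ [i] else st.2
        (x, c)) ((0 : Nat), comcom)).2) []
  PySem.List.sorted comcom (fun s => PySem.Str.len s) false

-- ===== PORT B =====
def getallcom_alt (gfbp : List String) (com : List String) : List String :=
  if gfbp = [] then []
  else
    let survivors := PySem.List.dedup com
    let survivors := gfbp.foldl (fun s j => s.filter (fun i => PySem.Str.isIn i j)) survivors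
    PySem.List.sorted survivors (fun s => PySem.Str.len s) false

-- ===== PRECONDITION & SPEC =====
def Spec_getallcom (gfbp : List String) (com : List String) (out : List String) : Prop := out = getallcom_alt gfbp com
instance (gfbp : List String) (com : List String) (out : List String) : Decidable (Spec_getallcom gfbp com out) := by unfold Spec_getallcom; infer_instance

-- ===== CLAIM (what is proved, stated in full; the proofs are below) =====
def Claim_equal_getallcom : Prop := ∀ (gfbp : List String) (com : List String), Dom_getallcom gfbp com → Spec_getallcom gfbp com (getallcom gfbp com)

-- ===== LEMMAS AND PROOFS =====

-- ordered dedup of `rest`, skipping elements already in `seen`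
def dAux (seen : List String) : List String → List String
  | [] => []
  | i :: t => if i ∈ seen then dAux seen t else i :: dAux (i :: seen) t

theorem dAux_congr (s s' : List String) (l : List String)
    (h : ∀ z, z ∈ s ↔ z ∈ s') : dAux s l = dAux s' l := by
  induction l generalizing s s' with
  | nil => rfl
  | cons i t ih =>
    simp only [dAux]
    by_cases hi : i ∈ s
    · rw [if_pos hi, if_pos ((h i).mp hi)]; exact ih s s' h
    · rw [if_neg hi, if_neg (fun hx => hi ((h i).mpr hx))]
      congr 1
      exact ih (i :: s) (i :: s') (by intro z; simp [h z])

theorem foldl_setAdd_eq_dAux (l : List String) (s : List String) :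
    l.foldl PySem.Set.add s = s ++ dAux s l := by
  induction l generalizing s with
  | nil => simp [dAux]
  | cons i t ih =>
    simp only [List.foldl_cons, dAux, PySem.Set.add]
    by_cases hi : i ∈ s
    · simp only [PySem.Set.contains_eq_listContains]
      rw [if_pos (by simpa using hi), if_pos hi]; exact ih s
    · simp only [PySem.Set.contains_eq_listContains]
      rw [if_neg (by simpa using hi), if_neg hi, ih (s ++ [i])]
      rw [dAux_congr (s ++ [i]) (i :: s) t (by intro z; simp; tauto)]
      simp

theorem dedup_eq_dAux (l : List String) : PySem.List.dedup l = dAux [] l := by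
  rw [PySem.List.dedup_eq_ofList, PySem.Set.ofList_eq_foldl, foldl_setAdd_eq_dAux]
  simp

-- B's repeated filtering pass equals one filter by the conjunction
theorem foldl_filter_eq_filter_all (gfbp : List String) (s : List String) :
    gfbp.foldl (fun s j => s.filter (fun i => PySem.Str.isIn i j)) s
      = s.filter (fun i => gfbp.all (fun j => PySem.Str.isIn i j)) := by
  induction gfbp generalizing s with
  | nil => simp
  | cons j t ih =>
    simp only [List.foldl_cons, ih, List.filter_filter, List.all_cons]
    exact List.filter_congr (fun a _ => by rw [Bool.and_comm])

-- A's inner loop: the append fires exactly at the last string, when all strings contain i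
theorem innerA_eq (n : Nat) (i : String) (js : List String) (x : Nat) (c : List String)
    (hle : x + js.length ≤ n) :
    (js.foldl (fun (st : Nat × List String) j =>
        let x := if PySem.Str.isIn i j then st.1 + 1 else st.1
        let c := if x = n ∧ i ∉ st.2 then st.2 ++ [i] else st.2
        (x, c)) (x, c)).2
      = if x + js.length = n ∧ js ≠ [] ∧ js.all (fun j => PySem.Str.isIn i j) ∧ i ∉ c
        then c ++ [i] else c := by
  induction js generalizing x c with
  | nil => simp
  | cons j t ih =>
    simp only [List.foldl_cons, List.length_cons] at hle ⊢
    by_cases hb : PySem.Str.isIn i j = true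
    · simp only [hb, if_true]
      by_cases hfire : x + 1 = n ∧ i ∉ c
      · have ht : t = [] := by
          cases t with
          | nil => rfl
          | cons a b =>
            exfalso
            simp only [List.length_cons] at hle
            omega
        subst ht
        rw [if_pos hfire]
        simp only [List.foldl_nil, List.length_nil, List.all_cons, List.all_nil]
        rw [if_pos ⟨by omega, by simp, by simpa using hb, hfire.2⟩]
      · rw [if_neg hfire]
        rw [ih (x + 1) c (by omega)]
        have hcond : (x + 1 + t.length = n ∧ t ≠ [] ∧ t.all (fun j => PySem.Str.isIn i j) = true ∧ i ∉ c)
            ↔ (x + (t.length + 1) = n ∧ (j :: t) ≠ [] ∧ (j :: t).all (fun j => PySem.Str.isIn i j) = true ∧ i ∉ c) := by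
          simp only [List.all_cons, Bool.and_eq_true]
          constructor
          · rintro ⟨h1, h2, h3, h4⟩
            exact ⟨by omega, by simp, ⟨hb, h3⟩, h4⟩
          · rintro ⟨h1, -, h3, h4⟩
            refine ⟨by omega, ?_, h3.2, h4⟩
            intro ht
            subst ht
            simp only [List.length_nil] at h1
            exact hfire ⟨by omega, h4⟩
        by_cases hc : x + (t.length + 1) = n ∧ (j :: t) ≠ [] ∧ (j :: t).all (fun j => PySem.Str.isIn i j) = true ∧ i ∉ c
        · rw [if_pos (hcond.mpr hc), if_pos hc]
        · rw [if_neg (fun h => hc (hcond.mp h)), if_neg hc]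
    · have hb' : PySem.Str.isIn i j = false := by simpa using hb
      simp only [hb', Bool.false_eq_true, if_false]
      have hfire : ¬ (x = n ∧ i ∉ c) := by
        rintro ⟨h1, -⟩
        omega
      rw [if_neg hfire]
      rw [ih x c (by omega)]
      rw [if_neg ?_, if_neg ?_]
      · rintro ⟨-, -, h3, -⟩
        simp only [List.all_cons, Bool.and_eq_true] at h3
        exact hb h3.1
      · rintro ⟨h1, -, -, -⟩
        omega

-- A's outer loop with nonempty gfbp: append i iff all strings contain it and it is new
theorem outerA_eq (gfbp : List String) (hne : gfbp ≠ []) (com : List String)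
    (acc : List String) (seen : List String)
    (hinv : ∀ z, gfbp.all (fun j => PySem.Str.isIn z j) = true → (z ∈ acc ↔ z ∈ seen)) :
    com.foldl (fun comcom i =>
      (gfbp.foldl (fun (st : Nat × List String) j =>
        let x := if PySem.Str.isIn i j then st.1 + 1 else st.1
        let c := if x = gfbp.length ∧ i ∉ st.2 then st.2 ++ [i] else st.2
        (x, c)) ((0 : Nat), comcom)).2) acc
      = acc ++ (dAux seen com).filter (fun i => gfbp.all (fun j => PySem.Str.isIn i j)) := by
  induction com generalizing acc seen with
  | nil => simp [dAux]
  | cons i t ih =>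
    simp only [List.foldl_cons]
    rw [innerA_eq gfbp.length i gfbp 0 acc (by omega)]
    simp only [Nat.zero_add]
    by_cases hall : gfbp.all (fun j => PySem.Str.isIn i j) = true
    · by_cases hmem : i ∈ acc
      · rw [if_neg (by tauto)]
        have hseen : i ∈ seen := (hinv i hall).mp hmem
        rw [ih acc seen hinv]
        simp [dAux, hseen]
      · rw [if_pos ⟨by trivial, hne, hall, hmem⟩]
        have hseen : i ∉ seen := fun h => hmem ((hinv i hall).mpr h)
        rw [ih (acc ++ [i]) (i :: seen) (by intro z hz; simp [hinv z hz]; tauto)]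
        simp only [dAux, if_neg hseen]
        rw [show List.filter (fun i => gfbp.all fun j => PySem.Str.isIn i j) (i :: dAux (i :: seen) t)
              = i :: List.filter (fun i => gfbp.all fun j => PySem.Str.isIn i j) (dAux (i :: seen) t)
            from List.filter_cons_of_pos hall]
        simp
    · rw [if_neg (by tauto)]
      by_cases hseen : i ∈ seen
      · rw [ih acc seen hinv]; simp [dAux, hseen]
      · rw [ih acc (i :: seen) ?_]
        · simp only [dAux, if_neg hseen]
          rw [show List.filter (fun i => gfbp.all fun j => PySem.Str.isIn i j) (i :: dAux (i :: seen) t)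
                = List.filter (fun i => gfbp.all fun j => PySem.Str.isIn i j) (dAux (i :: seen) t)
              from List.filter_cons_of_neg hall]
        · intro z hz
          rw [hinv z hz]
          constructor
          · intro h; exact List.mem_cons_of_mem _ h
          · intro h
            rcases List.mem_cons.mp h with h | h
            · exfalso; subst h; exact hall hz
            · exact h

theorem outerA_nil (com : List String) (acc : List String) :
    com.foldl (fun comcom i =>
      (([] : List String).foldl (fun (st : Nat × List String) j =>
        let x := if PySem.Str.isIn i j then st.1 + 1 else st.1
        let c := if x = ([] : List String).length ∧ i ∉ st.2 then st.2 ++ [i] else st.2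
        (x, c)) ((0 : Nat), comcom)).2) acc = acc := by
  induction com generalizing acc with
  | nil => rfl
  | cons i t ih => simp only [List.foldl_cons, List.foldl_nil]; exact ih acc

-- ===== VERDICT (by name: the statement is the Claim_ definition above) =====
theorem getallcom_spec : Claim_equal_getallcom := by
  intro gfbp com _
  unfold Spec_getallcom getallcom getallcom_alt
  by_cases hne : gfbp = []
  · subst hne
    rw [outerA_nil com []]
    simp [PySem.List.sorted_eq_nil_iff]
  · rw [if_neg hne]
    rw [outerA_eq gfbp hne com [] [] (by simp)]
    simp only [foldl_filter_eq_filter_all, dedup_eq_dAux, List.nil_append]
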